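-- pv_equiv track=rewrite | github.com/SangjinH/algorithm | A형/123.py | solution
-- ===== SOURCE A (Python) =====
-- from collections import deque
--
-- def solution(N, coffee_times):
--     answer = []
--     INF = int(1e9)
--     if N == 1:
--         return list(range(1, len(coffee_times) + 1))
--
--     for idx, time in enumerate(coffee_times):
--         coffee_times[idx] = [time, idx + 1]
--
--     q = deque(coffee_times)
--
--     stack = []
--     while 1:
--
--         if len(stack) < N and len(q) != 0:
--             stack.append(q.popleft())
--             continue
--
--         if not stack:
--             break
--
--         mini = INF
--         for i in stack:
--             if i[0] < mini:
--                 mini = i[0]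
--
--         idx = 0
--         tmp = []
--         while 1:
--             if idx == len(stack):
--                 break
--
--             if stack[idx][0] == mini:
--                 tmp.append(stack.pop(idx)[1])
--             else:
--                 stack[idx][0] -= mini
--                 idx += 1
--         tmp.sort()
--         if len(tmp) == 1:
--             answer.append(tmp[0])
--         else:
--             for i in tmp:
--                 answer.append(i)
--
--     return answer
-- ===== SOURCE B (Python) =====
-- def solution(N, coffee_times):
--     # Event simulation on absolute finish times kept in an ordered list of
--     # (finish, index) pairs; no per-round subtraction, no INF cap.
--     jobs = [(t, i + 1) for i, t in enumerate(coffee_times)]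
--     heap = []          # ascending by (finish, index)
--     answer = []
--     t = 0
--     j = 0
--     while True:
--         if len(heap) < N and j < len(jobs):
--             dur, idx = jobs[j]
--             j += 1
--             entry = (t + dur, idx)
--             k = 0
--             while k < len(heap) and heap[k] < entry:
--                 k += 1
--             heap.insert(k, entry)
--             continue
--         if not heap:
--             break
--         t = heap[0][0]
--         while heap and heap[0][0] == t:
--             answer.append(heap.pop(0)[1])
--     return answer
-- ===== Notes on version B (the rewrite author's own statement) =====
-- stated objective: alternative
-- what changed: A repeatedly scans the whole in-service set, subtracts the minimum remaining time from every entry (capped at INF=1e9, so huge times cost several no-op rounds) and pops the zeroed jobs; B keeps an ordered list of absolute (finish_time, index) pairs, pops the equal-minimum block off the front and inserts each newly started job once, with no per-round subtraction and no INF cap.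
import Mathlib
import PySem

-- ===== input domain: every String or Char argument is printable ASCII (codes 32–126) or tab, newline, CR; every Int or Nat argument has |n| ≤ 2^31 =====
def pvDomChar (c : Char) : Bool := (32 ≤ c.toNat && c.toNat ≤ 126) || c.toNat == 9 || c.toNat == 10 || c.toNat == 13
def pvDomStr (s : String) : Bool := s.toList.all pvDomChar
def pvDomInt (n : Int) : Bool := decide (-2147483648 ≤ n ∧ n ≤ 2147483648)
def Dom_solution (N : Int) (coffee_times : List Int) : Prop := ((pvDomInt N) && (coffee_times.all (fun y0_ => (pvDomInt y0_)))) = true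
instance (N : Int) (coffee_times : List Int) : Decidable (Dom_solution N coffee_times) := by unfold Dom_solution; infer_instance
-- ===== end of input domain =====

-- B replaces A's repeated subtract-the-minimum rounds (with their 1e9 cap) by an event
-- simulation on absolute finish times kept in an ordered list; equivalence is about the
-- RETURN value only (A mutates its coffee_times argument in place, B does not).

-- ===== PORT A =====
-- mini = INF; for i in stack: if i[0] < mini: mini = i[0]
def aMin (stack : List (Int × Int)) : Int :=
  stack.foldl (fun m p => if p.1 < m then p.1 else m) 1000000000

-- the inner while: scan the stack left to right; entries equal to mini are popped
-- (their index goes to tmp), the others get mini subtracted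
def aScan (mini : Int) : List (Int × Int) → List Int × List (Int × Int)
  | [] => ([], [])
  | p :: rest =>
    let r := aScan mini rest
    if p.1 = mini then (p.2 :: r.1, r.2) else (r.1, (p.1 - mini, p.2) :: r.2)

-- termination facts for aLoop (cited in decreasing_by)
theorem aScan_fst (mini : Int) (l : List (Int × Int)) :
    (aScan mini l).1 = (l.filter (fun p => p.1 == mini)).map Prod.snd := by
  induction l with
  | nil => rfl
  | cons p rest ih => by_cases h : p.1 = mini <;> simp [aScan, h, ih]

theorem aScan_snd (mini : Int) (l : List (Int × Int)) :
    (aScan mini l).2 = (l.filter (fun p => p.1 != mini)).map (fun p => (p.1 - mini, p.2)) := by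
  induction l with
  | nil => rfl
  | cons p rest ih => by_cases h : p.1 = mini <;> simp [aScan, h, ih]

theorem aScan_length (mini : Int) (l : List (Int × Int)) :
    (aScan mini l).1.length + (aScan mini l).2.length = l.length := by
  induction l with
  | nil => rfl
  | cons p rest ih => by_cases h : p.1 = mini <;> simp [aScan, h] <;> omega

theorem aMin_le (l : List (Int × Int)) : ∀ p ∈ l, aMin l ≤ p.1 := by
  suffices h : ∀ (a : Int), (∀ p ∈ l, l.foldl (fun m p => if p.1 < m then p.1 else m) a ≤ p.1)
      ∧ l.foldl (fun m p => if p.1 < m then p.1 else m) a ≤ a by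
    exact (h 1000000000).1
  induction l with
  | nil => simp
  | cons p rest ih =>
    intro a
    constructor
    · intro x hx
      rcases List.mem_cons.mp hx with rfl | hx
      · simp only [List.foldl_cons]
        exact le_trans (ih _).2 (by split <;> omega)
      · exact (ih _).1 x hx
    · simp only [List.foldl_cons]
      exact le_trans (ih _).2 (by split <;> omega)

theorem aMin_cases (l : List (Int × Int)) :
    aMin l = 1000000000 ∨ ∃ p ∈ l, aMin l = p.1 := by
  suffices h : ∀ (a : Int), l.foldl (fun m p => if p.1 < m then p.1 else m) a = a
      ∨ ∃ p ∈ l, l.foldl (fun m p => if p.1 < m then p.1 else m) a = p.1 by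
    exact h 1000000000
  induction l with
  | nil => simp
  | cons p rest ih =>
    intro a
    simp only [List.foldl_cons]
    split
    · rcases ih p.1 with h | ⟨x, hx, hex⟩
      · exact Or.inr ⟨p, by simp, h⟩
      · exact Or.inr ⟨x, by simp [hx], hex⟩
    · rcases ih a with h | ⟨x, hx, hex⟩
      · exact Or.inl h
      · exact Or.inr ⟨x, by simp [hx], hex⟩

theorem sum_map_lt {α : Type} (l : List α) (f g : α → Nat) (hne : l ≠ [])
    (h : ∀ x ∈ l, f x < g x) : (l.map f).sum < (l.map g).sum := by
  induction l with
  | nil => exact absurd rfl hne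
  | cons x rest ih =>
    simp only [List.map_cons, List.sum_cons]
    rcases rest with _ | ⟨y, r⟩
    · simpa using h x (by simp)
    · have h2 := ih (by simp) (fun z hz => h z (List.mem_cons_of_mem _ hz))
      have h1 := h x (by simp)
      simp only [List.map_cons, List.sum_cons] at h2 ⊢
      omega

theorem aScan_nil_big (l : List (Int × Int)) (h : (aScan (aMin l) l).1 = []) :
    aMin l = 1000000000 ∧ ∀ p ∈ l, (1000000000 : Int) < p.1 := by
  have hno : ∀ p ∈ l, ¬ p.1 = aMin l := by
    intro p hp
    rw [aScan_fst] at h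
    have h' := List.filter_eq_nil_iff.mp (List.map_eq_nil_iff.mp h)
    simpa using h' p hp
  have hm : aMin l = 1000000000 := by
    rcases aMin_cases l with h1 | ⟨p, hp, hep⟩
    · exact h1
    · exact absurd hep.symm (hno p hp)
  refine ⟨hm, fun p hp => ?_⟩
  have := aMin_le l p hp
  have := hno p hp
  omega

theorem aScan_measure (l : List (Int × Int)) (hne : l ≠ [])
    (h : (aScan (aMin l) l).1 = []) :
    (((aScan (aMin l) l).2).map (fun p => p.1.toNat)).sum < (l.map (fun p => p.1.toNat)).sum := by
  obtain ⟨hm, hbig⟩ := aScan_nil_big l h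
  have hno : ∀ p ∈ l, ¬ p.1 = aMin l := by
    intro p hp hpe
    have := hbig p hp
    omega
  rw [aScan_snd]
  have hfe : l.filter (fun p => p.1 != aMin l) = l := by
    apply List.filter_eq_self.mpr
    intro p hp
    simpa using hno p hp
  rw [hfe, List.map_map]
  apply sum_map_lt _ _ _ hne
  intro p hp
  have := hbig p hp
  simp only [Function.comp]
  omega

def aLoop (N : Int) (q stack : List (Int × Int)) (answer : List Int) : List Int :=
  if h : (stack.length : Int) < N ∧ q ≠ [] then
    match q with
    | [] => answer
    | x :: q' => aLoop N q' (stack ++ [x]) answer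
  else if stack = [] then answer
  else
    let mini := aMin stack
    let r := aScan mini stack
    let s := PySem.List.sorted r.1 (fun x => x) false
    aLoop N q r.2 (if s.length = 1 then answer ++ [s.headD 0] else answer ++ s)
termination_by (q.length + stack.length, q.length, (stack.map (fun p => p.1.toNat)).sum)
decreasing_by
  · have e1 : q'.length + (stack ++ [x]).length = (x :: q').length + stack.length := by
      simp; omega
    rw [e1]
    exact Prod.Lex.right _ (Prod.Lex.left _ _ (by simp))
  · by_cases he : (aScan (aMin stack) stack).1 = []
    · have h1 := aScan_length (aMin stack) stack
      have h2 := aScan_measure stack (by assumption) he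
      rw [he] at h1
      have e1 : q.length + (aScan (aMin stack) stack).2.length = q.length + stack.length := by
        simp at h1; omega
      rw [e1]
      exact Prod.Lex.right _ (Prod.Lex.right _ h2)
    · have h1 := aScan_length (aMin stack) stack
      have : (aScan (aMin stack) stack).1.length ≠ 0 := by
        simpa [List.length_eq_zero_iff] using he
      exact Prod.Lex.left _ _ (by omega)

def solution (N : Int) (coffee_times : List Int) : List Int :=
  if N = 1 then PySem.List.pyRange 1 ((coffee_times.length : Int) + 1) 1
  else aLoop N ((PySem.List.enumerate coffee_times 0).map (fun p => (p.2, p.1 + 1))) [] []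

-- ===== PORT B =====
-- Python tuple comparison (finish, index) < (finish, index)
def tupLt (a b : Int × Int) : Bool := a.1 < b.1 || (a.1 == b.1 && a.2 < b.2)

-- k = 0; while k < len(heap) and heap[k] < entry: k += 1; heap.insert(k, entry)
def bInsert (e : Int × Int) : List (Int × Int) → List (Int × Int)
  | [] => [e]
  | p :: rest => if tupLt p e then p :: bInsert e rest else e :: p :: rest

-- while heap and heap[0][0] == t: answer.append(heap.pop(0)[1])
def bPop (t : Int) : List (Int × Int) → List Int × List (Int × Int)
  | [] => ([], [])
  | p :: rest =>
    if p.1 = t then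
      let r := bPop t rest
      (p.2 :: r.1, r.2)
    else ([], p :: rest)

-- termination facts for bLoop
theorem bInsert_length (e : Int × Int) (l : List (Int × Int)) :
    (bInsert e l).length = l.length + 1 := by
  induction l with
  | nil => rfl
  | cons p rest ih => by_cases h : tupLt p e <;> simp [bInsert, h, ih]

theorem bPop_le (t : Int) (l : List (Int × Int)) :
    ((bPop t l).2).length ≤ l.length := by
  induction l with
  | nil => simp [bPop]
  | cons p rest ih => by_cases h : p.1 = t <;> simp [bPop, h] <;> omega

theorem bPop_head_lt (l : List (Int × Int)) (hne : l ≠ []) :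
    ((bPop (l.headD (0, 0)).1 l).2).length < l.length := by
  rcases l with _ | ⟨p, rest⟩
  · exact absurd rfl hne
  · have := bPop_le p.1 rest
    simp [bPop]
    omega

def bLoop (N : Int) (jobs heap : List (Int × Int)) (t : Int) (answer : List Int) : List Int :=
  if h : (heap.length : Int) < N ∧ jobs ≠ [] then
    match jobs with
    | [] => answer
    | (dur, idx) :: rest => bLoop N rest (bInsert (t + dur, idx) heap) t answer
  else if hh : heap = [] then answer
  else
    let t' := (heap.headD (0, 0)).1
    let r := bPop t' heap
    bLoop N jobs r.2 t' (answer ++ r.1)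
termination_by (jobs.length + heap.length, jobs.length)
decreasing_by
  · have e1 : rest.length + (bInsert (t + dur, idx) heap).length
        = ((dur, idx) :: rest).length + heap.length := by
      simp [bInsert_length]; omega
    rw [e1]
    exact Prod.Lex.right _ (by simp)
  · have := bPop_head_lt heap (by assumption)
    exact Prod.Lex.left _ _ (by omega)

def solution_alt (N : Int) (coffee_times : List Int) : List Int :=
  bLoop N ((PySem.List.enumerate coffee_times 0).map (fun p => (p.2, p.1 + 1))) [] 0 []

-- ===== PRECONDITION & SPEC =====
def Spec_solution (N : Int) (coffee_times : List Int) (out : List Int) : Prop := out = solution_alt N coffee_times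
instance (N : Int) (coffee_times : List Int) (out : List Int) : Decidable (Spec_solution N coffee_times out) := by unfold Spec_solution; infer_instance

-- ===== CLAIM (what is proved, stated in full; the proofs are below) =====
def Claim_equal_solution : Prop := ∀ (N : Int) (coffee_times : List Int), Dom_solution N coffee_times → Spec_solution N coffee_times (solution N coffee_times)

-- ===== LEMMAS AND PROOFS =====

theorem tupLt_fst_le {a b : Int × Int} (h : tupLt a b = true) : a.1 ≤ b.1 := by
  simp [tupLt] at h; omega

theorem tupLt_trans {a b c : Int × Int} (h1 : tupLt a b = true) (h2 : tupLt b c = true) :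
    tupLt a c = true := by
  simp [tupLt] at *; omega

theorem tupLt_of_not {a b : Int × Int} (h1 : ¬ tupLt a b = true) (h2 : a.2 ≠ b.2) :
    tupLt b a = true := by
  simp [tupLt] at *; omega

theorem bInsert_perm (e : Int × Int) (l : List (Int × Int)) :
    (bInsert e l).Perm (e :: l) := by
  induction l with
  | nil => simp [bInsert]
  | cons p rest ih =>
    by_cases h : tupLt p e
    · simpa [bInsert, h] using (ih.cons p).trans (List.Perm.swap e p rest)
    · simp [bInsert, h]

theorem bInsert_pairwise (e : Int × Int) (l : List (Int × Int))
    (hs : l.Pairwise (fun a b => tupLt a b = true)) (hf : ∀ p ∈ l, p.2 ≠ e.2) :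
    (bInsert e l).Pairwise (fun a b => tupLt a b = true) := by
  induction l with
  | nil => simp [bInsert]
  | cons p rest ih =>
    rcases List.pairwise_cons.mp hs with ⟨hp, hrest⟩
    by_cases h : tupLt p e
    · rw [bInsert, if_pos h]
      refine List.pairwise_cons.mpr ⟨?_, ih hrest (fun y hy => hf y (List.mem_cons_of_mem _ hy))⟩
      intro y hy
      rcases List.mem_cons.mp ((bInsert_perm e rest).mem_iff.mp hy) with rfl | hy
      · exact h
      · exact hp y hy
    · rw [bInsert, if_neg h]
      have hep : tupLt e p = true := tupLt_of_not h (hf p (by simp))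
      refine List.pairwise_cons.mpr ⟨?_, hs⟩
      intro y hy
      rcases List.mem_cons.mp hy with rfl | hy
      · exact hep
      · exact tupLt_trans hep (hp y hy)

theorem bPop_spec (t : Int) (l : List (Int × Int))
    (hmin : ∀ p ∈ l, t ≤ p.1) (hs : l.Pairwise (fun a b => tupLt a b = true)) :
    (bPop t l).1 = (l.filter (fun p => p.1 == t)).map Prod.snd ∧
    (bPop t l).2 = l.filter (fun p => p.1 != t) := by
  induction l with
  | nil => simp [bPop]
  | cons p rest ih =>
    rcases List.pairwise_cons.mp hs with ⟨hp, hrest⟩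
    by_cases h : p.1 = t
    · have := ih (fun y hy => hmin y (List.mem_cons_of_mem _ hy)) hrest
      simp [bPop, h, this.1, this.2]
    · have hgt : t < p.1 := lt_of_le_of_ne (hmin p (by simp)) (Ne.symm h)
      have hrge : ∀ y ∈ rest, t < y.1 := by
        intro y hy
        exact lt_of_lt_of_le hgt (tupLt_fst_le (hp y hy))
      constructor
      · rw [bPop, if_neg h]
        have : (p :: rest).filter (fun p => p.1 == t) = [] := by
          apply List.filter_eq_nil_iff.mpr
          intro y hy
          rcases List.mem_cons.mp hy with rfl | hy
          · simpa using h
          · have := hrge y hy; simp; omega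
        simp [this]
      · rw [bPop, if_neg h]
        have : (p :: rest).filter (fun p => p.1 != t) = p :: rest := by
          apply List.filter_eq_self.mpr
          intro y hy
          rcases List.mem_cons.mp hy with rfl | hy
          · simpa using h
          · have := hrge y hy; simp; omega
        simp [this]

theorem bLoop_t_irrel (N : Int) (jobs heap : List (Int × Int)) (t t' : Int) (ans : List Int)
    (hng : ¬((heap.length : Int) < N ∧ jobs ≠ [])) :
    bLoop N jobs heap t ans = bLoop N jobs heap t' ans := by
  conv_lhs => rw [bLoop.eq_def]
  conv_rhs => rw [bLoop.eq_def]
  simp only [dif_neg hng]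

theorem bLoop_one (jobs : List (Int × Int)) :
    ∀ (t : Int) (ans : List Int), bLoop 1 jobs [] t ans = ans ++ jobs.map Prod.snd := by
  induction jobs with
  | nil => intro t ans; rw [bLoop.eq_def]; simp
  | cons p rest ih =>
    intro t ans
    obtain ⟨dur, idx⟩ := p
    rw [bLoop.eq_def]
    simp only [List.length_nil, Nat.cast_zero, zero_lt_one, ne_eq, reduceCtorEq,
      not_false_eq_true, and_self, dif_pos]
    rw [bLoop.eq_def]
    simp only [bInsert, List.length_cons, List.length_nil]
    norm_num
    rw [show bPop (t + dur) [(t + dur, idx)] = ([idx], []) by simp [bPop]]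
    rw [ih]
    simp

theorem singleton_headD (l : List Int) (h : l.length = 1) : [l.headD 0] = l := by
  rcases l with _ | ⟨a, l'⟩
  · simp at h
  · simp at h
    simp [h]

theorem aLoop_eq_bLoop (N : Int) (q stack : List (Int × Int)) (ans : List Int) :
    ∀ (t : Int) (heap : List (Int × Int)),
      heap.Perm (stack.map (fun p => (p.1 + t, p.2))) →
      heap.Pairwise (fun a b => tupLt a b = true) →
      (heap.map Prod.snd ++ q.map Prod.snd).Nodup →
      aLoop N q stack ans = bLoop N q heap t ans := by
  induction q, stack, ans using aLoop.induct N with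
  | case1 stack ans h => exact absurd rfl h.2
  | case2 stack ans x q' h ih =>
    intro t heap hperm hsort hnd
    obtain ⟨dur, idx⟩ := x
    have hlen : heap.length = stack.length := by simpa using hperm.length_eq
    have hB : (heap.length : Int) < N ∧ (dur, idx) :: q' ≠ [] := ⟨by rw [hlen]; exact h.1, h.2⟩
    rw [aLoop.eq_def, bLoop.eq_def, dif_pos h, dif_pos hB]
    have hfresh : ∀ p ∈ heap, p.2 ≠ idx := by
      intro p hp he
      have h1 : p.2 ∈ heap.map Prod.snd := List.mem_map_of_mem hp
      have h2 : idx ∈ ((dur, idx) :: q').map Prod.snd := by simp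
      exact (List.disjoint_of_nodup_append hnd) h1 (he ▸ h2)
    apply ih
    · refine ((bInsert_perm _ _).trans ?_)
      refine (hperm.cons _).trans ?_
      simp only [List.map_append, List.map_cons, List.map_nil, add_comm]
      exact (List.perm_append_singleton _ _).symm
    · exact bInsert_pairwise _ _ hsort hfresh
    · have hp1 : (heap.map Prod.snd ++ ((dur, idx) :: q').map Prod.snd).Perm
          ((bInsert (t + dur, idx) heap).map Prod.snd ++ q'.map Prod.snd) := by
        refine List.Perm.trans ?_ ((((bInsert_perm _ heap).map Prod.snd).append_right _).symm)
        simp only [List.map_cons]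
        exact List.perm_middle
      exact hp1.nodup hnd
  | case3 q ans h =>
    intro t heap hperm hsort hnd
    have hnil : heap = [] := by simpa using hperm.eq_nil
    subst hnil
    rw [aLoop.eq_def, bLoop.eq_def]
    simp only [dif_neg h]
    simp
  | case4 q stack ans h hne mini r s ih =>
    intro t heap hperm hsort hnd
    simp only [mini, r, s] at ih
    have hlen : heap.length = stack.length := by simpa using hperm.length_eq
    have hBneg : ¬((heap.length : Int) < N ∧ q ≠ []) := by rw [hlen]; exact h
    have hhne : heap ≠ [] := by
      intro hx; subst hx
      exact hne (by simpa using hperm.symm.eq_nil)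
    rw [aLoop.eq_def]
    simp only [dif_neg h, if_neg hne]
    by_cases hcase : (aScan (aMin stack) stack).1 = []
    · -- tmp == []: A only subtracts 10^9 from every entry, B's state is untouched
      obtain ⟨hm, hbig⟩ := aScan_nil_big stack hcase
      have hsnil : PySem.List.sorted (aScan (aMin stack) stack).1 (fun x => x) = [] := by
        rw [hcase]; rfl
      have hs0 : (PySem.List.sorted ([] : List Int) fun x => x) = [] := rfl
      simp only [hcase, hs0, List.length_nil, List.append_nil] at ih ⊢
      rw [bLoop_t_irrel N q heap t (t + 1000000000) ans hBneg]
      apply ih (t + 1000000000) heap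
      · refine hperm.trans ?_
        rw [aScan_snd, List.filter_eq_self.mpr (by intro p hp; have := hbig p hp; simp; omega),
          List.map_map]
        apply List.Perm.of_eq
        apply List.map_congr_left
        intro p hp
        simp [hm]
      · exact hsort
      · exact hnd
    · -- tmp ≠ []: A pops the minimal entries, B pops the head block of the heap
      rcases hhp : heap with _ | ⟨hd, hrest⟩
      · exact absurd hhp hhne
      subst hhp
      have hdmin : ∀ p ∈ hd :: hrest, hd.1 ≤ p.1 := by
        intro p hp
        rcases List.mem_cons.mp hp with rfl | hp
        · exact le_refl _
        · exact tupLt_fst_le ((List.pairwise_cons.mp hsort).1 p hp)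
      have hex : ∃ p ∈ stack, p.1 = aMin stack := by
        rw [aScan_fst] at hcase
        rcases List.exists_mem_of_ne_nil _ hcase with ⟨y, hy⟩
        rcases List.mem_map.mp hy with ⟨p, hp, _⟩
        exact ⟨p, List.mem_of_mem_filter hp, by simpa using (List.mem_filter.mp hp).2⟩
      have ht' : hd.1 = aMin stack + t := by
        obtain ⟨p0, hp0, hp0e⟩ := hex
        have hmem : (p0.1 + t, p0.2) ∈ hd :: hrest :=
          hperm.mem_iff.mpr (List.mem_map_of_mem hp0)
        have h1 : hd.1 ≤ aMin stack + t := by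
          have := hdmin _ hmem
          simp at this
          omega
        have h2 : ∃ p1 ∈ stack, hd = (p1.1 + t, p1.2) := by
          have := hperm.subset (List.mem_cons_self)
          rcases List.mem_map.mp this with ⟨p1, hp1, he⟩
          exact ⟨p1, hp1, he.symm⟩
        obtain ⟨p1, hp1, he1⟩ := h2
        have h3 := aMin_le stack p1 hp1
        have h4 : hd.1 = p1.1 + t := by rw [he1]
        omega
      have hpop := bPop_spec hd.1 (hd :: hrest) hdmin hsort
      have hfeq : ∀ p ∈ stack, ((p.1 + t == hd.1)) = (p.1 == aMin stack) := by
        intro p _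
        rw [ht']
        by_cases hx : p.1 = aMin stack
        · simp [hx]
        · simp [hx]
      have houtperm : ((bPop hd.1 (hd :: hrest)).1).Perm ((aScan (aMin stack) stack).1) := by
        rw [hpop.1, aScan_fst]
        refine ((hperm.filter _).map _).trans ?_
        apply List.Perm.of_eq
        rw [List.filter_map, List.map_map]
        have : (stack.filter ((fun p => p.1 == hd.1) ∘ (fun p => (p.1 + t, p.2))))
            = stack.filter (fun p => p.1 == aMin stack) :=
          List.filter_congr (by intro p hp; simpa using hfeq p hp)
        rw [this]
        rfl
      have hpw : ((bPop hd.1 (hd :: hrest)).1).Pairwise (· < ·) := by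
        rw [hpop.1]
        apply List.pairwise_map.mpr
        have hpf : ((hd :: hrest).filter (fun p => p.1 == hd.1)).Pairwise
            (fun a b => tupLt a b = true) :=
          List.Pairwise.sublist List.filter_sublist hsort
        refine hpf.imp_of_mem ?_
        intro a b ha hb hab
        have ha1 : a.1 = hd.1 := by simpa using (List.mem_filter.mp ha).2
        have hb1 : b.1 = hd.1 := by simpa using (List.mem_filter.mp hb).2
        simp [tupLt] at hab
        omega
      have hout : PySem.List.sorted ((aScan (aMin stack) stack).1) (fun x => x)
          = (bPop hd.1 (hd :: hrest)).1 :=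
        PySem.List.sorted_eq_of_perm_of_pairwise_lt _ _ _ houtperm hpw
      have hperm' : ((bPop hd.1 (hd :: hrest)).2).Perm
          (((aScan (aMin stack) stack).2).map (fun p => (p.1 + hd.1, p.2))) := by
        rw [hpop.2, aScan_snd, List.map_map]
        have he2 : ((stack.filter (fun p => p.1 != aMin stack)).map
            ((fun p => (p.1 + hd.1, p.2)) ∘ (fun p => (p.1 - aMin stack, p.2))))
            = (stack.filter (fun p => p.1 != aMin stack)).map (fun p => (p.1 + t, p.2)) := by
          apply List.map_congr_left
          intro p _
          have hz : p.1 - aMin stack + hd.1 = p.1 + t := by omega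
          show (p.1 - aMin stack + hd.1, p.2) = (p.1 + t, p.2)
          rw [hz]
        rw [he2]
        refine ((hperm.filter _)).trans ?_
        apply List.Perm.of_eq
        rw [List.filter_map]
        congr 1
        apply List.filter_congr
        intro p hp
        have := hfeq p hp
        show (!(p.1 + t == hd.1)) = (!(p.1 == aMin stack))
        rw [this]
      have hsort' : ((bPop hd.1 (hd :: hrest)).2).Pairwise (fun a b => tupLt a b = true) := by
        rw [hpop.2]
        exact List.Pairwise.sublist List.filter_sublist hsort
      have hnd' : (((bPop hd.1 (hd :: hrest)).2).map Prod.snd ++ q.map Prod.snd).Nodup := by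
        rw [hpop.2]
        exact hnd.sublist ((List.filter_sublist.map Prod.snd).append_right _)
      rw [bLoop.eq_def]
      simp only [dif_neg hBneg, dif_neg hhne, List.headD_cons]
      have hdans : (if (PySem.List.sorted ((aScan (aMin stack) stack).1) (fun x => x)).length = 1
          then ans ++ [(PySem.List.sorted ((aScan (aMin stack) stack).1) (fun x => x)).headD 0]
          else ans ++ PySem.List.sorted ((aScan (aMin stack) stack).1) (fun x => x))
          = ans ++ (bPop hd.1 (hd :: hrest)).1 := by
        rw [hout]
        split
        · rename_i h1
          rw [singleton_headD _ h1]
        · rfl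
      simp only [dite_eq_ite] at ih
      rw [hdans]
      rw [hdans] at ih
      exact ih hd.1 _ hperm' hsort' hnd'

theorem range_shift (ct : List Int) :
    PySem.List.pyRange 1 ((ct.length : Int) + 1) 1
      = ((PySem.List.enumerate ct 0).map (fun p => (p.2, p.1 + 1))).map Prod.snd := by
  rw [List.map_map]
  have h1 : (Prod.snd ∘ fun (p : Int × Int) => (p.2, p.1 + 1)) = fun (p : Int × Int) => p.1 + 1 := rfl
  rw [h1]
  have h2 : (PySem.List.enumerate ct 0).map (fun p => p.1 + 1)
      = ((PySem.List.enumerate ct 0).map (fun x => x.1)).map (fun x => x + 1) := by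
    rw [List.map_map]; rfl
  rw [h2, PySem.List.map_fst_enumerate, PySem.List.pyRange_one, PySem.List.pyRange_one,
    List.map_map]
  have h3 : ((ct.length : Int) + 1 - 1).toNat = ((0 : Int) + ct.length - 0).toNat := by omega
  rw [h3]
  apply List.map_congr_left
  intro k _
  simp
  omega

theorem solution_spec : Claim_equal_solution := by
  unfold Claim_equal_solution
  intro N ct _
  unfold Spec_solution solution solution_alt
  by_cases hN : N = 1
  · subst hN
    rw [if_pos rfl, bLoop_one]
    simpa using range_shift ct
  · rw [if_neg hN]
    refine aLoop_eq_bLoop N _ [] [] 0 [] (by simp) (by simp) ?_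
    have := PySem.List.nodup_pyRange_one 1 ((ct.length : Int) + 1)
    rw [range_shift ct] at this
    simpa using this
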